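-- pv_equiv track=rewrite | github.com/6u3m/statistics-2330 | plotting.py | get_pos_top_height
-- ===== SOURCE A (Python) =====
-- import typing
--
-- def get_pos_top_height(plot_list: typing.List[typing.Any]):
--     plot_list = [plot for plot in plot_list if plot]
--     plot_index = [i for i in range(len(plot_list))]
--     sub_graph_count = len(plot_index)
--     border = 5
--     # if sub_graph_count == 0 or sub_graph_count == 1:
--     #     pos_top_list = [5, 90]
--     #     height_list = [85, 15]
--     # else:
--     #     pos_top_list = [5]
--     #     height_list = [20]
--     label = 5
--     split_height = int( (100 - (sub_graph_count+1)*border - label) / sub_graph_count )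
--     pos_top_list = [border]
--     height_list = [split_height]
--     for i in range(sub_graph_count-1):
--         label = 5 if i == 0 else 0
--         pos_top_list.append(pos_top_list[-1] + height_list[-1] + border + label)
--         height_list.append(split_height)
--     return pos_top_list, height_list
-- ===== SOURCE B (Python) =====
-- import typing
--
-- def get_pos_top_height(plot_list: typing.List[typing.Any]):
--     n = sum(1 for plot in plot_list if plot)
--     border = 5
--     split_height = int((100 - (n + 1) * border - 5) / n)
--     step = split_height + border
--     pos_top_list = [border + k * step + (5 if k else 0) for k in range(n)]
--     return pos_top_list, [split_height] * n
-- ===== Notes on version B (the rewrite author's own statement) =====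
-- stated objective: simpler
-- what changed: Replaces A's accumulating append-to-last loop over two growing lists by a closed-form index formula: position k is border + k*(split_height+border) plus a one-time label of 5 for every k>=1, emitted as a comprehension, with heights as [split_height]*n.
import Mathlib
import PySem

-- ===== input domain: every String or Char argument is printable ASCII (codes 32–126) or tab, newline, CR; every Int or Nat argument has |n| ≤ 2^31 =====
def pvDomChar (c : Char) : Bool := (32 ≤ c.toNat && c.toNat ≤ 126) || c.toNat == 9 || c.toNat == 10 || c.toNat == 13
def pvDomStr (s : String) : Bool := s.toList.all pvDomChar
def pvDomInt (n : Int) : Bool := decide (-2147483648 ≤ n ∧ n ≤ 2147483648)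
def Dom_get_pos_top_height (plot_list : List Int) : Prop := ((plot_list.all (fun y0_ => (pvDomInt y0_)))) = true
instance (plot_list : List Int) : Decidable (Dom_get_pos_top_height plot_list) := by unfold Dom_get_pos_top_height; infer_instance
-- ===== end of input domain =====

-- B replaces A's accumulating append loop by a closed-form per-index formula (objective: simpler).

-- ===== PORT A =====
-- int((100-(n+1)*5-5)/n) is ported as Int truncating division (Int.tdiv): on the admitted
-- list lengths the float quotient is exact enough that Python's int() truncation equals tdiv.
def get_pos_top_height (plot_list : List Int) : List Int × List Int :=
  let pl := plot_list.filter (fun p => p ≠ 0)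
  let plot_index := List.map (fun (i : Nat) => (i : Int)) (List.range pl.length)
  let sub_graph_count : Int := plot_index.length
  let border : Int := 5
  let label : Int := 5
  let split_height : Int := (100 - (sub_graph_count + 1) * border - label).tdiv sub_graph_count
  let init : List Int × List Int := ([border], [split_height])
  ((List.range (pl.length - 1)).foldl (fun st i =>
      let label : Int := if i = 0 then 5 else 0
      (st.1 ++ [(PySem.List.pyGet? st.1 (-1)).getD 0 + (PySem.List.pyGet? st.2 (-1)).getD 0 + border + label],
       st.2 ++ [split_height])) init)

-- ===== PORT B =====
def get_pos_top_height_alt (plot_list : List Int) : List Int × List Int :=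
  let n := (plot_list.countP (fun p => p ≠ 0))
  let border : Int := 5
  let split_height : Int := (100 - ((n : Int) + 1) * border - 5).tdiv n
  let step := split_height + border
  (List.map (fun (k : Nat) => border + (k : Int) * step + if k = 0 then 0 else 5) (List.range n),
   List.replicate n split_height)

-- ===== PRECONDITION & SPEC =====
-- Pre_ excludes exactly the inputs with no truthy (nonzero) element, on which A raises ZeroDivisionError.
def Pre_get_pos_top_height (plot_list : List Int) : Prop := ∃ x ∈ plot_list, x ≠ 0
instance (plot_list : List Int) : Decidable (Pre_get_pos_top_height plot_list) := by unfold Pre_get_pos_top_height; infer_instance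
def pvWitness_get_pos_top_height : List Int := [1, 2, 3]
def Spec_get_pos_top_height (plot_list : List Int) (out : List Int × List Int) : Prop := out = get_pos_top_height_alt plot_list
instance (plot_list : List Int) (out : List Int × List Int) : Decidable (Spec_get_pos_top_height plot_list out) := by unfold Spec_get_pos_top_height; infer_instance

-- ===== CLAIM (what is proved, stated in full; the proofs are below) =====
def Claim_equal_get_pos_top_height : Prop := ∀ (plot_list : List Int), Dom_get_pos_top_height plot_list → Pre_get_pos_top_height plot_list → Spec_get_pos_top_height plot_list (get_pos_top_height plot_list)

-- ===== LEMMAS AND PROOFS =====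

-- closed form for one position
def pvPos (s : Int) (k : Nat) : Int := 5 + (k : Int) * (s + 5) + if k = 0 then 0 else 5

theorem pvLoop (s : Int) (m : Nat) :
    (List.range m).foldl (fun (st : List Int × List Int) i =>
        let label : Int := if i = 0 then 5 else 0
        (st.1 ++ [(PySem.List.pyGet? st.1 (-1)).getD 0 + (PySem.List.pyGet? st.2 (-1)).getD 0 + 5 + label],
         st.2 ++ [s])) ([5], [s])
    = ((List.range (m + 1)).map (pvPos s), List.replicate (m + 1) s) := by
  induction m with
  | zero => simp [pvPos]
  | succ m ih =>
    rw [List.range_succ, List.foldl_append, ih]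
    simp only [List.foldl_cons, List.foldl_nil]
    have h1 : (List.range (m + 1)).map (pvPos s) = (List.range m).map (pvPos s) ++ [pvPos s m] := by
      rw [List.range_succ, List.map_append]; rfl
    have hlast : PySem.List.pyGet? ((List.range (m + 1)).map (pvPos s)) (-1) = some (pvPos s m) := by
      rw [h1]; exact PySem.List.pyGet?_neg_one_append_singleton _ _
    have hlast2 : PySem.List.pyGet? (List.replicate (m + 1) s) (-1) = some s := by
      rw [List.replicate_succ']; exact PySem.List.pyGet?_neg_one_append_singleton _ _
    rw [hlast, hlast2]
    have hstep : pvPos s m + s + 5 + (if m = 0 then 5 else 0) = pvPos s (m + 1) := by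
      unfold pvPos
      rcases Nat.eq_zero_or_pos m with h | h
      · subst h; norm_num; ring
      · have hne : m ≠ 0 := h.ne'
        simp only [hne, if_false, Nat.add_eq_zero_iff, and_false, one_ne_zero]
        push_cast
        ring
    have h3 : (List.range (m + 1 + 1)).map (pvPos s) = (List.range (m + 1)).map (pvPos s) ++ [pvPos s (m + 1)] := by
      rw [List.range_succ, List.map_append]; rfl
    simp only [Option.getD_some, hstep, h3]
    rw [List.replicate_succ' (n := m + 1)]

set_option maxHeartbeats 1000000 in
theorem get_pos_top_height_spec' (plot_list : List Int)
    (hpre : Pre_get_pos_top_height plot_list) :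
    get_pos_top_height plot_list = get_pos_top_height_alt plot_list := by
  obtain ⟨x, hx, hx0⟩ := hpre
  have hmem : x ∈ plot_list.filter (fun p => p ≠ 0) := by
    rw [List.mem_filter]; exact ⟨hx, by simpa using hx0⟩
  have hpos : 0 < (plot_list.filter (fun p => p ≠ 0)).length :=
    List.length_pos_of_mem hmem
  obtain ⟨m, hm⟩ : ∃ m, (plot_list.filter (fun p => p ≠ 0)).length = m + 1 :=
    ⟨_, (Nat.succ_pred_eq_of_pos hpos).symm⟩
  have hc : plot_list.countP (fun p => decide (p ≠ 0)) = m + 1 := by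
    rw [List.countP_eq_length_filter]; exact hm
  simp only [get_pos_top_height, get_pos_top_height_alt, List.length_map, List.length_range]
  rw [hm, hc, Nat.add_sub_cancel, pvLoop]
  refine Prod.ext (List.map_congr_left fun k hk => ?_) rfl
  unfold pvPos
  rcases Nat.eq_zero_or_pos k with h | h
  · subst h; norm_num
  · have hne : k ≠ 0 := h.ne'
    simp only [hne, if_false]


-- ===== VERDICT (by name: the statement is the Claim_ definition above) =====
theorem get_pos_top_height_spec : Claim_equal_get_pos_top_height := by
  intro pl _ hpre
  exact get_pos_top_height_spec' pl hpre
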